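-- pv_equiv track=rewrite | github.com/kayoMichael/SolvedLeetCode | iteration/longest_consecutive_ones.py | consecutive_ones
-- ===== SOURCE A (Python) =====
-- def consecutive_ones(s):
--     left = 0
--     flip = 1
--     answer = 0
--
--     for right in range(len(s)):
--         if s[right] == "0":
--             flip -= 1
--         while flip < 0:
--             if s[left] == "0":
--                 flip += 1
--             left += 1
--         answer = max(answer, right - left + 1)
--
--     return answer
-- ===== SOURCE B (Python) =====
-- def consecutive_ones(s):
--     prev = curr = best = 0
--     for c in s:
--         if c == "0":
--             prev, curr = curr, 0
--         else:
--             curr += 1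
--         best = max(best, prev + curr + 1)
--     return min(best, len(s))
-- ===== Notes on version B (the rewrite author's own statement) =====
-- stated objective: simpler
-- what changed: Replaces the two-pointer sliding window (with its inner while-loop and left pointer) by a single pass tracking run lengths: prev = ones before the last zero, curr = ones since it, best = max(prev+curr+1), capped by min(best, len(s)) for the no-zero case.
import Mathlib
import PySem

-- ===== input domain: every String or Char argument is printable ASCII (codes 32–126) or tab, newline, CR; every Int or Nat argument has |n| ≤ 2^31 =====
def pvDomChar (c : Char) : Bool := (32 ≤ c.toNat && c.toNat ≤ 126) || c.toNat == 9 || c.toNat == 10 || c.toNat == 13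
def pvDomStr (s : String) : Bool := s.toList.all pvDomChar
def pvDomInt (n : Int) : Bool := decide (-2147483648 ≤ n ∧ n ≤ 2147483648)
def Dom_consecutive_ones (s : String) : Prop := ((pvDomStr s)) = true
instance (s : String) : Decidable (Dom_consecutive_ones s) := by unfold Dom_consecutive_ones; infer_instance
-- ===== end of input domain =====

-- B replaces A's two-pointer window + inner while-loop by a single pass over run lengths
-- (ones before the last zero / ones since it), capped by min(best, len s); same O(n) cost.

-- ===== PORT A =====
-- the inner `while flip < 0` loop; fuel only makes the recursion total (never exhausted on
-- reachable states).  `getD left ' '` is exact here: Python's s[left] is always in range when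
-- the while body runs (the window then contains a '0' at or after `left`).
def aWhile (cs : List Char) (flip : Int) (left : Nat) (fuel : Nat) : Int × Nat :=
  match fuel with
  | 0 => (flip, left)
  | fuel + 1 =>
    if flip < 0 then
      let flip := if cs.getD left ' ' = '0' then flip + 1 else flip
      aWhile cs flip (left + 1) fuel
    else (flip, left)

-- the `for right in range(len(s))` loop
def aGo (cs : List Char) (left : Nat) (flip answer : Int) (right : Nat) : Int :=
  if right < cs.length then
    let flip := if cs.getD right ' ' = '0' then flip - 1 else flip
    let p := aWhile cs flip left (cs.length + 1)
    let answer := max answer ((right : Int) - (p.2 : Int) + 1)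
    aGo cs p.2 p.1 answer (right + 1)
  else answer
termination_by cs.length - right

def consecutive_ones (s : String) : Int :=
  aGo s.toList 0 1 0 0

-- ===== PORT B =====
def bStep (st : Int × Int × Int) (c : Char) : Int × Int × Int :=
  let (prev, curr, best) := st
  let (prev, curr) := if c = '0' then (curr, 0) else (prev, curr + 1)
  (prev, curr, max best (prev + curr + 1))

def consecutive_ones_alt (s : String) : Int :=
  let st := s.toList.foldl bStep (0, 0, 0)
  min st.2.2 (s.toList.length : Int)

-- ===== PRECONDITION & SPEC =====
def Spec_consecutive_ones (s : String) (out : Int) : Prop := out = consecutive_ones_alt s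
instance (s : String) (out : Int) : Decidable (Spec_consecutive_ones s out) := by unfold Spec_consecutive_ones; infer_instance

-- ===== CLAIM (what is proved, stated in full; the proofs are below) =====
def Claim_equal_consecutive_ones : Prop := ∀ (s : String), Dom_consecutive_ones s → Spec_consecutive_ones s (consecutive_ones s)

-- ===== LEMMAS AND PROOFS =====

-- Invariant relating A's state (left, flip, answer) and B's state (prev, curr, best) after the
-- processed prefix p: either p has no '0' (window is all of p), or p = u ++ v ++ '0' :: w with the
-- window v ++ '0' :: w containing exactly the last '0' of p, v/w zero-free, and answer = best ≤ |p|.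
def WInv (p : List Char) (left : Nat) (flip answer prev curr best : Int) : Prop :=
  ('0' ∉ p ∧ left = 0 ∧ flip = 1 ∧ prev = 0 ∧ curr = (p.length : Int) ∧
     answer = (p.length : Int) ∧ best = (if p = [] then 0 else (p.length : Int) + 1))
  ∨ (∃ u v w : List Char, p = u ++ v ++ '0' :: w ∧ '0' ∉ v ∧ '0' ∉ w ∧
     left = u.length ∧ flip = 0 ∧ prev = (v.length : Int) ∧ curr = (w.length : Int) ∧
     answer = best ∧ best ≤ (p.length : Int))

lemma getD_append_cons (u r : List Char) (x d : Char) :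
    (u ++ x :: r).getD u.length d = x := by
  simp [List.getD, List.getElem?_append_right (le_refl u.length)]

-- when flip is already ≥ 0 the while loop does nothing
lemma aWhile_nonneg (cs : List Char) (flip : Int) (left fuel : Nat) (h : ¬ flip < 0) :
    aWhile cs flip left fuel = (flip, left) := by
  match fuel with
  | 0 => rfl
  | fuel + 1 => simp [aWhile, h]

-- The while loop with flip = -1 scans the zero-free block v and stops just past the '0' after it.
lemma aWhile_spec (v : List Char) : ∀ (u rest : List Char) (fuel : Nat),
    '0' ∉ v → v.length < fuel →
    aWhile (u ++ v ++ '0' :: rest) (-1) u.length fuel = (0, u.length + v.length + 1) := by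
  induction v with
  | nil =>
    intro u rest fuel _ hf
    match fuel, hf with
    | fuel + 1, _ =>
      rw [show u ++ [] ++ '0' :: rest = u ++ '0' :: rest by simp]
      simp only [aWhile]
      rw [if_pos (show (-1 : Int) < 0 by norm_num), getD_append_cons u rest '0' ' ']
      simp only [if_pos rfl]
      rw [show (-1 : Int) + 1 = 0 by ring, aWhile_nonneg _ _ _ _ (by norm_num)]
      simp
  | cons a v ih =>
    intro u rest fuel hv hf
    match fuel, hf with
    | fuel + 1, hf =>
      have ha : a ≠ '0' := by intro h; exact hv (h ▸ List.mem_cons_self)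
      simp only [aWhile]
      rw [if_pos (by norm_num)]
      have hg : (u ++ (a :: v) ++ '0' :: rest).getD u.length ' ' = a := by
        have := getD_append_cons u (v ++ '0' :: rest) a ' '
        simpa using this
      rw [hg, if_neg ha]
      have hrw : u ++ (a :: v) ++ '0' :: rest = (u ++ [a]) ++ v ++ '0' :: rest := by simp
      have hl : u.length + 1 = (u ++ [a]).length := by simp
      rw [hrw, hl, ih (u ++ [a]) rest fuel (fun h => hv (List.mem_cons_of_mem a h))
        (by simpa using Nat.lt_of_succ_lt_succ hf)]
      simp; omega

-- one step of the loops preserves the invariant (stated on the full list p ++ c :: rest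
-- so the while-loop lemma applies directly)
lemma inv_step (p rest : List Char) (c : Char) (left : Nat)
    (flip answer prev curr best : Int)
    (hI : WInv p left flip answer prev curr best) :
    WInv (p ++ [c])
      (aWhile (p ++ c :: rest) (if c = '0' then flip - 1 else flip) left
        ((p ++ c :: rest).length + 1)).2
      (aWhile (p ++ c :: rest) (if c = '0' then flip - 1 else flip) left
        ((p ++ c :: rest).length + 1)).1
      (max answer ((p.length : Int) -
        ((aWhile (p ++ c :: rest) (if c = '0' then flip - 1 else flip) left
          ((p ++ c :: rest).length + 1)).2 : Int) + 1))
      (bStep (prev, curr, best) c).1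
      (bStep (prev, curr, best) c).2.1
      (bStep (prev, curr, best) c).2.2 := by
  set cs := p ++ c :: rest with hcs
  rcases hI with ⟨hnz, hl, hf, hprev, hcurr, hans, hbest⟩ |
    ⟨u, v, w, hp, hv, hw, hl, hf, hprev, hcurr, hans, hbest⟩
  · by_cases hc : c = '0'
    · -- first zero: move to second disjunct with u = [], v = p, w = []
      have hq : aWhile cs (if c = '0' then flip - 1 else flip) left (cs.length + 1)
          = (flip - 1, left) := by
        rw [if_pos hc, hf]
        exact aWhile_nonneg _ _ _ _ (by norm_num)
      rw [hq]
      right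
      refine ⟨[], p, [], by simp [hc], hnz, by simp, ?_, ?_, ?_, ?_, ?_, ?_⟩
      · simp [hl]
      · simp [hf]
      · simp [bStep, hc, hcurr]
      · simp [bStep, hc]
      · simp only [bStep, if_pos hc, hl, hans, hprev, hcurr, hbest]
        by_cases hp0 : p = [] <;> simp [hp0] <;> omega
      · simp only [bStep, if_pos hc, hl, hprev, hcurr]
        simp; omega
    · -- still no zero
      have hq : aWhile cs (if c = '0' then flip - 1 else flip) left (cs.length + 1)
          = (flip, left) := by
        rw [if_neg hc]
        exact aWhile_nonneg _ _ _ _ (by omega)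
      rw [hq]
      left
      refine ⟨by simp [hnz, Ne.symm hc], by simp [hl], by simp [hf], ?_, ?_, ?_, ?_⟩
      · simp [bStep, hc, hprev]
      · simp only [bStep, if_neg hc, hcurr]; simp <;> omega
      · simp only [hl, hans]; simp <;> omega
      · simp only [bStep, if_neg hc, hprev, hcurr, hbest]
        by_cases hp0 : p = [] <;> simp [hp0] <;> push_cast <;> omega
  · by_cases hc : c = '0'
    · -- new zero: the while loop slides just past the old last zero
      have hq : aWhile cs (if c = '0' then flip - 1 else flip) left (cs.length + 1)
          = (0, u.length + v.length + 1) := by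
        rw [if_pos hc, hf, hl]
        have hsplit : cs = u ++ v ++ '0' :: (w ++ '0' :: rest) := by
          simp [hcs, hp, hc]
        rw [show (0 : Int) - 1 = -1 by ring, hsplit]
        exact aWhile_spec v u (w ++ '0' :: rest) _ hv (by simp [hcs, hp]; omega)
      rw [hq]
      right
      refine ⟨u ++ v ++ ['0'], w, [], by simp [hp, hc], hw, by simp, ?_, ?_, ?_, ?_, ?_, ?_⟩
      · simp; omega
      · simp
      · simp [bStep, hc, hcurr]
      · simp [bStep, hc]
      · simp only [bStep, if_pos hc, hans, hprev, hcurr]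
        have harith : (p.length : Int) - ((u.length + v.length + 1 : Nat) : Int) + 1
            = (w.length : Int) + 1 := by
          simp [hp]; push_cast; ring
        rw [harith]; simp
      · simp only [bStep, if_pos hc, hcurr]
        have : (w.length : Int) + 1 ≤ (p.length : Int) := by
          simp [hp]; push_cast; omega
        simp; push_cast; omega
    · -- one more one: window grows on the right
      have hq : aWhile cs (if c = '0' then flip - 1 else flip) left (cs.length + 1)
          = (flip, left) := by
        rw [if_neg hc]
        exact aWhile_nonneg _ _ _ _ (by omega)
      rw [hq]
      right
      refine ⟨u, v, w ++ [c], by simp [hp], hv, ?_, by simp [hl], by simp [hf],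
        ?_, ?_, ?_, ?_⟩
      · intro h
        rcases List.mem_append.1 h with h | h
        · exact hw h
        · simp only [List.mem_singleton] at h
          exact hc h.symm
      · simp [bStep, hc, hprev]
      · simp only [bStep, if_neg hc, hcurr]; simp <;> omega
      · simp only [bStep, if_neg hc, hl, hans, hprev, hcurr]
        have harith : (p.length : Int) - (u.length : Int) + 1
            = (v.length : Int) + ((w.length : Int) + 1) + 1 := by
          simp [hp]
        rw [harith]
      · simp only [bStep, if_neg hc, hprev, hcurr]
        have hle : (v.length : Int) + ((w.length : Int) + 1) + 1 ≤ (p.length : Int) + 1 := by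
          simp [hp]
        simp; push_cast; omega

-- main correspondence: running A's remaining loop from an invariant state equals B's fold + cap
lemma main_lemma : ∀ (rest p : List Char) (left : Nat) (flip answer prev curr best : Int),
    WInv p left flip answer prev curr best →
    aGo (p ++ rest) left flip answer p.length =
      min ((rest.foldl bStep (prev, curr, best)).2.2) (((p ++ rest).length : Int)) := by
  intro rest
  induction rest with
  | nil =>
    intro p left flip answer prev curr best hI
    rw [aGo]
    simp only [List.append_nil, lt_self_iff_false, if_false]
    rcases hI with ⟨_, _, _, _, _, hans, hbest⟩ | ⟨_, _, _, _, _, _, _, _, _, _, hans, hbest⟩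
    · by_cases hp0 : p = []
      · subst hp0; simp [List.foldl] at *; omega
      · simp only [List.foldl, hbest, if_neg hp0, hans]; omega
    · simp only [List.foldl, hans]; omega
  | cons c rest ih =>
    intro p left flip answer prev curr best hI
    rw [aGo]
    have hlen : p.length < (p ++ c :: rest).length := by simp
    rw [if_pos hlen, getD_append_cons p rest c ' ']
    have hstep := inv_step p rest c left flip answer prev curr best hI
    have hihe := ih (p ++ [c])
      (aWhile (p ++ c :: rest) (if c = '0' then flip - 1 else flip) left
        ((p ++ c :: rest).length + 1)).2
      (aWhile (p ++ c :: rest) (if c = '0' then flip - 1 else flip) left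
        ((p ++ c :: rest).length + 1)).1
      (max answer ((p.length : Int) -
        ((aWhile (p ++ c :: rest) (if c = '0' then flip - 1 else flip) left
          ((p ++ c :: rest).length + 1)).2 : Int) + 1))
      (bStep (prev, curr, best) c).1
      (bStep (prev, curr, best) c).2.1
      (bStep (prev, curr, best) c).2.2 hstep
    simp only [List.append_assoc, List.singleton_append, List.length_append,
      List.length_singleton] at hihe ⊢
    rw [show p.length + 1 = (p ++ [c]).length by simp] at hihe ⊢
    simpa using hihe

-- ===== VERDICT (by name: the statement is the Claim_ definition above) =====
theorem consecutive_ones_spec : Claim_equal_consecutive_ones := by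
  intro s _
  unfold Spec_consecutive_ones consecutive_ones consecutive_ones_alt
  have h := main_lemma s.toList [] 0 1 0 0 0 0 (by simp [WInv])
  simpa using h
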